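-- pv_equiv track=rewrite | github.com/w0ot-net/dns_download_exec | unit_tests/test_budget_packet_bounds.py | _payload_labels_for_chars
-- ===== SOURCE A (Python) =====
-- def _payload_labels_for_chars(char_count, label_cap):
--     labels = []
--     remaining = char_count
--     while remaining > 0:
--         take = label_cap if remaining > label_cap else remaining
--         labels.append("a" * take)
--         remaining -= take
--     return tuple(labels)
-- ===== SOURCE B (Python) =====
-- def _payload_labels_for_chars(char_count, label_cap):
--     if char_count <= 0:
--         return ()
--     full, rem = divmod(char_count, label_cap)
--     labels = ["a" * label_cap] * full if full else []
--     if rem: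
--         labels.append("a" * rem)
--     return tuple(labels)
-- ===== Notes on version B (the rewrite author's own statement) =====
-- stated objective: simpler
-- what changed: Replaced the decrement-and-append while loop by a closed-form divmod: full labels = quotient copies of 'a'*label_cap plus one remainder label if nonzero.
import Mathlib
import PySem

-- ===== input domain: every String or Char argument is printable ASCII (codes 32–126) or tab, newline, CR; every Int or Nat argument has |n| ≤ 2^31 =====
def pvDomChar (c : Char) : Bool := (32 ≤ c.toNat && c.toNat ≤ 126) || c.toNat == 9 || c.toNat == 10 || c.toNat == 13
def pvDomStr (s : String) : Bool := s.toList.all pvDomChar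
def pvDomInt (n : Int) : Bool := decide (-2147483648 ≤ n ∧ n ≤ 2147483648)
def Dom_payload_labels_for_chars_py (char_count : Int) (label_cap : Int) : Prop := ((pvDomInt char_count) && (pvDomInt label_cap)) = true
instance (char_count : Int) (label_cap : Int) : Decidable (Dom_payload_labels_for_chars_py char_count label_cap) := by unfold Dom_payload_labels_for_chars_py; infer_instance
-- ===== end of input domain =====

-- B replaces A's decrement-and-append while loop by a closed-form divmod construction (simpler).
-- Pre_ excludes char_count > 0 with label_cap ≤ 0, where the Python A loops forever (take = label_cap ≤ 0 never shrinks remaining).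


-- ===== PORT A =====
-- "a" * take  (negative repeat count gives the empty string, as in Python)
def pvARepA (take : Int) : String := String.ofList (List.replicate take.toNat 'a')

-- the while loop of A, with fuel for totality (the fuel suffices on Pre_; Python diverges outside it)
def pvALoop (fuel : Nat) (remaining : Int) (label_cap : Int) (labels : List String) : List String :=
  match fuel with
  | 0 => labels
  | fuel + 1 =>
    if remaining > 0 then
      let take := if remaining > label_cap then label_cap else remaining
      pvALoop fuel (remaining - take) label_cap (labels ++ [pvARepA take])
    else labels

def payload_labels_for_chars_py (char_count : Int) (label_cap : Int) : List String :=
  pvALoop char_count.toNat char_count label_cap []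

-- ===== PORT B =====
def payload_labels_for_chars_py_alt (char_count : Int) (label_cap : Int) : List String :=
  if char_count ≤ 0 then []
  else
    let full := PySem.Int.floordiv char_count label_cap
    let rem := PySem.Int.mod char_count label_cap
    (if 0 < full then List.replicate full.toNat (pvARepA label_cap) else []) ++
      (if rem ≠ 0 then [pvARepA rem] else [])

-- ===== PRECONDITION & SPEC =====
-- Pre_ excludes char_count > 0 with label_cap ≤ 0: there the Python A never terminates.
def Pre_payload_labels_for_chars_py (char_count : Int) (label_cap : Int) : Prop :=
  char_count ≤ 0 ∨ 1 ≤ label_cap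
instance (char_count : Int) (label_cap : Int) : Decidable (Pre_payload_labels_for_chars_py char_count label_cap) := by unfold Pre_payload_labels_for_chars_py; infer_instance

def pvWitness_payload_labels_for_chars_py : Int × Int := (7, 3)

def Spec_payload_labels_for_chars_py (char_count : Int) (label_cap : Int) (out : List String) : Prop := out = payload_labels_for_chars_py_alt char_count label_cap
instance (char_count : Int) (label_cap : Int) (out : List String) : Decidable (Spec_payload_labels_for_chars_py char_count label_cap out) := by unfold Spec_payload_labels_for_chars_py; infer_instance

-- ===== CLAIM (what is proved, stated in full; the proofs are below) =====
def Claim_equal_payload_labels_for_chars_py : Prop := ∀ (char_count : Int) (label_cap : Int), Dom_payload_labels_for_chars_py char_count label_cap → Pre_payload_labels_for_chars_py char_count label_cap → Spec_payload_labels_for_chars_py char_count label_cap (payload_labels_for_chars_py char_count label_cap)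

-- ===== LEMMAS AND PROOFS =====
lemma pvAlt_nonpos (c l : Int) (h : c ≤ 0) : payload_labels_for_chars_py_alt c l = [] := by
  simp [payload_labels_for_chars_py_alt, h]

-- unfold B's port for positive char_count, absorbing the 'if full' allocation guard
lemma pvAlt_unfold (c l : Int) (hl : 1 ≤ l) (hc : ¬ c ≤ 0) :
    payload_labels_for_chars_py_alt c l =
      List.replicate (c / l).toNat (pvARepA l) ++
        (if c % l ≠ 0 then [pvARepA (c % l)] else []) := by
  have hl0 : (0:Int) < l := by omega
  simp only [payload_labels_for_chars_py_alt, hc, if_false,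
    PySem.Int.floordiv_eq_ediv_of_pos hl0, PySem.Int.mod_eq_emod_of_pos hl0]
  have hq : 0 ≤ c / l := Int.ediv_nonneg (by omega) (by omega)
  by_cases h : 0 < c / l
  · simp [h]
  · have h0 : c / l = 0 := by omega
    simp [h0]

lemma pvAlt_step (c l : Int) (hl : 1 ≤ l) (h : c > l) :
    payload_labels_for_chars_py_alt c l = pvARepA l :: payload_labels_for_chars_py_alt (c - l) l := by
  have hl0 : (0:Int) < l := by omega
  have hc0 : ¬ c ≤ 0 := by omega
  have hc0' : ¬ c - l ≤ 0 := by omega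
  rw [pvAlt_unfold c l hl hc0, pvAlt_unfold (c - l) l hl hc0']
  have hdiv : c / l = (c - l) / l + 1 := by
    simpa using Int.add_mul_ediv_right (c - l) 1 (show l ≠ 0 by omega)
  have hmod : c % l = (c - l) % l := (Int.sub_emod_right c l).symm
  have hq0 : 0 ≤ (c - l) / l := Int.ediv_nonneg (by omega) (by omega)
  have hqt : (c / l).toNat = ((c - l) / l).toNat + 1 := by
    rw [hdiv]; omega
  rw [hqt, hmod, List.replicate_succ]
  simp

lemma pvAlt_last (c l : Int) (hl : 1 ≤ l) (h0 : 0 < c) (h : c ≤ l) :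
    payload_labels_for_chars_py_alt c l = [pvARepA c] := by
  have hl0 : (0:Int) < l := by omega
  have hc0 : ¬ c ≤ 0 := by omega
  rw [pvAlt_unfold c l hl hc0]
  have hc : c ≠ 0 := by omega
  rcases eq_or_lt_of_le h with heq | hlt
  · subst heq
    simp [hc]
  · have hdiv : c / l = 0 := Int.ediv_eq_zero_of_lt (by omega) hlt
    have hmod : c % l = c := Int.emod_eq_of_lt (by omega) hlt
    simp [hdiv, hmod, hc]

lemma pvALoop_eq (fuel : Nat) : ∀ (r l : Int) (acc : List String), 1 ≤ l → r.toNat ≤ fuel →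
    pvALoop fuel r l acc = acc ++ payload_labels_for_chars_py_alt r l := by
  induction fuel with
  | zero =>
    intro r l acc hl hf
    have : r ≤ 0 := by omega
    simp [pvALoop, pvAlt_nonpos r l this]
  | succ f ih =>
    intro r l acc hl hf
    by_cases hr : r > 0
    · simp only [pvALoop, hr, if_true]
      by_cases hrl : r > l
      · have htake : (if r > l then l else r) = l := by simp [hrl]
        rw [htake, ih (r - l) l _ hl (by omega), pvAlt_step r l hl hrl]
        simp
      · have htake : (if r > l then l else r) = r := by simp [hrl]
        rw [htake, ih (r - r) l _ hl (by omega), pvAlt_last r l hl hr (by omega), sub_self,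
          pvAlt_nonpos 0 l le_rfl]
        simp
    · simp [pvALoop, hr, pvAlt_nonpos r l (by omega)]

-- ===== VERDICT (by name: the statement is the Claim_ definition above) =====
theorem payload_labels_for_chars_py_spec : Claim_equal_payload_labels_for_chars_py := by
  intro c l _ hpre
  unfold Spec_payload_labels_for_chars_py payload_labels_for_chars_py
  rcases hpre with h | h
  · have : c.toNat = 0 := by omega
    rw [this]
    simp [pvALoop, pvAlt_nonpos c l h]
  · simpa using pvALoop_eq c.toNat c l [] h (le_refl _)
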